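-- pv_equiv track=rewrite | github.com/Gr1ngoire/DM_Lab_02 | Actions/Algorythms/RelationProperties.py | reflection_antireflection
-- ===== SOURCE A (Python) =====
-- def reflection_antireflection(matrix):
--     reflection_marker = True
--     antireflection_marker = True
--     for i in range(len(matrix)):
--         for j in range(len(matrix[i])):
--             if i == j and matrix[i][j] == 0:
--                 reflection_marker = False
--             if i == j and matrix[i][j] == 1:
--                 antireflection_marker = False
--     if reflection_marker:
--         result = "Reflective"
--     elif antireflection_marker:
--         result = "Antireflective"
--     else:
--         result = "Neither reflective, nor antireflective"
--     return result
-- ===== SOURCE B (Python) =====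
-- def reflection_antireflection(matrix):
--     diagonal = [row[i] for i, row in enumerate(matrix) if i < len(row)]
--     if 0 not in diagonal:
--         return "Reflective"
--     if 1 not in diagonal:
--         return "Antireflective"
--     return "Neither reflective, nor antireflective"
-- ===== Notes on version B (the rewrite author's own statement) =====
-- stated objective: faster
-- what changed: B first extracts the diagonal values into a list with one pass over the rows, then classifies by two membership tests (0 in / 1 in), replacing A's nested scan of every cell with an i==j test and boolean markers.
import Mathlib
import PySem

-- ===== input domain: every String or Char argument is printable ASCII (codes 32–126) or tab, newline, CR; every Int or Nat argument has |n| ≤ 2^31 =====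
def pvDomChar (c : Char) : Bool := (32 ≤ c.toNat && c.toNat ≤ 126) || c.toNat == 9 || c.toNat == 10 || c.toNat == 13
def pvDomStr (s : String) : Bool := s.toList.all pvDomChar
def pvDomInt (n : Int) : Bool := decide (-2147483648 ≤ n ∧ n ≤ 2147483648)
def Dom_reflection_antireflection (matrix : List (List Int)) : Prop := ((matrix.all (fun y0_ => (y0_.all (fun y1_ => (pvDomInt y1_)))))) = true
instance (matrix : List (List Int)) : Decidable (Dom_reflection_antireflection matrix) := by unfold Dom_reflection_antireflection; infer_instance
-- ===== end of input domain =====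

-- B extracts the diagonal into a list in one pass over the rows and classifies by two membership tests, instead of A's nested scan of every cell with boolean markers.

-- ===== PORT A =====
-- A's nested loop: for every cell (i, j), flip the markers when i == j and the cell is 0 / 1
def pvALoop (matrix : List (List Int)) : Bool × Bool :=
  (PySem.List.pyRange 0 (matrix.length : Int) 1).foldl
    (fun (st : Bool × Bool) i =>
      -- i ∈ range(len(matrix)), so matrix[i] is in bounds: pyGetD is exact here
      let row := PySem.List.pyGetD matrix i []
      (PySem.List.pyRange 0 (row.length : Int) 1).foldl
        (fun (st : Bool × Bool) j =>
          -- j ∈ range(len(row)), so row[j] is in bounds: pyGetD is exact here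
          let st1 := if i = j ∧ PySem.List.pyGetD row j 0 = 0 then (false, st.2) else st
          if i = j ∧ PySem.List.pyGetD row j 0 = 1 then (st1.1, false) else st1) st)
    (true, true)

def reflection_antireflection (matrix : List (List Int)) : String :=
  let markers := pvALoop matrix
  if markers.1 then "Reflective"
  else if markers.2 then "Antireflective"
  else "Neither reflective, nor antireflective"

-- ===== PORT B =====
-- diagonal = [row[i] for i, row in enumerate(matrix) if i < len(row)]
def pvDiag (matrix : List (List Int)) : List Int :=
  (PySem.List.enumerate matrix).filterMap
    (fun p => if p.1 < (p.2.length : Int) then some (PySem.List.pyGetD p.2 p.1 0) else none)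

def reflection_antireflection_alt (matrix : List (List Int)) : String :=
  let diagonal := pvDiag matrix
  if !diagonal.contains 0 then "Reflective"
  else if !diagonal.contains 1 then "Antireflective"
  else "Neither reflective, nor antireflective"

-- ===== PRECONDITION & SPEC =====
def Spec_reflection_antireflection (matrix : List (List Int)) (out : String) : Prop := out = reflection_antireflection_alt matrix
instance (matrix : List (List Int)) (out : String) : Decidable (Spec_reflection_antireflection matrix out) := by unfold Spec_reflection_antireflection; infer_instance

-- ===== CLAIM (what is proved, stated in full; the proofs are below) =====
def Claim_equal_reflection_antireflection : Prop := ∀ (matrix : List (List Int)), Dom_reflection_antireflection matrix → Spec_reflection_antireflection matrix (reflection_antireflection matrix)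

-- ===== LEMMAS AND PROOFS =====

-- the effect of visiting the diagonal cell with value d
def pvDiagStep (d : Int) (st : Bool × Bool) : Bool × Bool :=
  (if d = 0 then false else st.1, if d = 1 then false else st.2)

-- A's inner loop over a row touches the state only at column i
theorem pv_inner_eq (row : List Int) (i : Int) (hi : 0 ≤ i) :
    ∀ (n : ℕ) (st : Bool × Bool),
      (PySem.List.pyRange 0 (n : Int) 1).foldl
        (fun (st : Bool × Bool) j =>
          if i = j ∧ PySem.List.pyGetD row j 0 = 1 then
            ((if i = j ∧ PySem.List.pyGetD row j 0 = 0 then (false, st.2) else st).1, false)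
          else if i = j ∧ PySem.List.pyGetD row j 0 = 0 then (false, st.2) else st) st
      = if i < (n : Int) then pvDiagStep (PySem.List.pyGetD row i 0) st else st := by
  intro n
  induction n with
  | zero =>
    intro st
    rw [PySem.List.pyRange_one_eq_nil (by omega)]
    simp only [List.foldl_nil]
    rw [if_neg (by omega)]
  | succ n ih =>
    intro st
    have hcast : ((n + 1 : ℕ) : Int) = (n : Int) + 1 := by push_cast; ring
    rw [hcast, PySem.List.pyRange_one_succ_right (by omega), List.foldl_concat, ih st]
    rcases lt_trichotomy i (n : Int) with h | h | h
    · simp [h, show ¬ i = (n : Int) from by omega, show i < (n : Int) + 1 from by omega]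
    · rw [if_neg (show ¬ i < (n : Int) from by omega),
          if_pos (show i < (n : Int) + 1 from by omega), ← h]
      by_cases h0 : PySem.List.pyGetD row i 0 = 0 <;>
        by_cases h1 : PySem.List.pyGetD row i 0 = 1 <;>
          simp [pvDiagStep, h0, h1]
    · simp [show ¬ i = (n : Int) from by omega, show ¬ i < (n : Int) from by omega,
            show ¬ i < (n : Int) + 1 from by omega]

-- folding pvDiagStep over a list of diagonal values records exactly membership of 0 and 1
theorem pv_fold_diagstep (ds : List Int) :
    ∀ (st : Bool × Bool),
      ds.foldl (fun st d => pvDiagStep d st) st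
      = (st.1 && !ds.contains 0, st.2 && !ds.contains 1) := by
  induction ds with
  | nil => intro st; simp
  | cons d ds ih =>
    intro st
    rw [List.foldl_cons, ih]
    by_cases h0 : d = 0 <;> by_cases h1 : d = 1 <;>
      simp [pvDiagStep, h0, h1, eq_comm]

-- folding a step over a filterMap'ed list = folding the guarded step over the original list
theorem pv_foldl_filterMap {α β γ : Type} (f : α → Option β) (g : γ → β → γ) (l : List α) :
    ∀ (init : γ),
      (l.filterMap f).foldl g init
      = l.foldl (fun acc x => match f x with | some b => g acc b | none => acc) init := by
  induction l with
  | nil => intro init; rfl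
  | cons x l ih =>
    intro init
    cases hx : f x <;> simp [hx, ih]

-- both programs' data reduce to the same marker pair
theorem pv_loop_eq (matrix : List (List Int)) :
    pvALoop matrix = (!(pvDiag matrix).contains 0, !(pvDiag matrix).contains 1) := by
  have hdiag : pvDiag matrix
      = (PySem.List.pyRange 0 (matrix.length : Int) 1).filterMap
          (fun i =>
            if i < ((PySem.List.pyGetD matrix i []).length : Int) then
              some (PySem.List.pyGetD (PySem.List.pyGetD matrix i []) i 0)
            else none) := by
    unfold pvDiag
    rw [PySem.List.enumerate_eq_map_pyRange (xs := matrix) (d := ([] : List Int)),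
        List.filterMap_map]
    rfl
  have hfold : pvALoop matrix
      = ((PySem.List.pyRange 0 (matrix.length : Int) 1).filterMap
          (fun i =>
            if i < ((PySem.List.pyGetD matrix i []).length : Int) then
              some (PySem.List.pyGetD (PySem.List.pyGetD matrix i []) i 0)
            else none)).foldl (fun st d => pvDiagStep d st) (true, true) := by
    rw [pv_foldl_filterMap]
    unfold pvALoop
    apply PySem.List.foldl_congr_mem
    intro st i hi
    have hi0 : (0 : Int) ≤ i := by
      simpa using (PySem.List.mem_pyRange_one.mp hi).1
    dsimp only
    rw [pv_inner_eq (PySem.List.pyGetD matrix i []) i hi0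
          (PySem.List.pyGetD matrix i []).length st]
    by_cases hlt : i < ((PySem.List.pyGetD matrix i []).length : Int)
    · rw [if_pos hlt, if_pos hlt]
    · rw [if_neg hlt, if_neg hlt]
  rw [hdiag, hfold, pv_fold_diagstep]
  simp

-- ===== VERDICT (by name: the statement is the Claim_ definition above) =====
theorem reflection_antireflection_spec : Claim_equal_reflection_antireflection := by
  intro matrix _
  unfold Spec_reflection_antireflection reflection_antireflection reflection_antireflection_alt
  rw [pv_loop_eq]
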